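-- pv_equiv track=rewrite | github.com/izsvenezie-virology/FluMut | src/flumut/sequence_utility/translator.py | _get_codon
-- ===== SOURCE A (Python) =====
-- from typing import List, Optional, Tuple
--
-- def _get_codon(seq: List[str], start: int, is_first: bool = False) -> Tuple[List[str], int]:
--     '''
--     Extract the codon from a sequence.
--
--     :param `List[str] seq`: Sequence splitted by nucleotides.
--     :param `int` start: Start position of the codon.
--     :param `bool` is_first: If `true` codons containing `-` are returned as is.
--     If `false` a frameshift is created.
--     :return `str`, `str`, `str` codon: The codon splitted by nucleotides.
--     :return `int` frameshift_status: Number of nucleotides moved in order to create the codon.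
--     '''
--     codon = seq[start:start + 3]
--     if codon == ['-', '-', '-']:  # If the codon is a deletion
--         return codon, None
--     # If the codon starts from mid codon (to avoid frameshifts in truncated sequences):
--     if is_first and '-' in codon:
--         return codon, None
--     if 'N' in codon:
--         return codon, None
--     codon = [n for n in codon if n != '-']
--     frameshift_status = 3 - len(codon)
--     while len(codon) < 3:
--         next_nucl = _find_next_nucl(seq, start)
--         if not next_nucl:
--             break
--         codon.append(seq[next_nucl])
--         seq[next_nucl] = '-'
--     return codon, frameshift_status
--
-- def _find_next_nucl(seq: List[str], start: int) -> Optional[int]: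
--     '''
--     Return the position of the next non deleted nucleotide.
--
--     :param `List[str]` seq: The sequence splitted by nucleotide.
--     :param `int` start: The position where to start to search for nucleotide.
--     :return `int`|`None`: The position of next non-deleted nucleotide. If no nucleotide is fuound it returns `None`.
--     '''
--     for i in range(start + 3, len(seq)):
--         if not seq[i] == '-':
--             return i
--     return None
-- ===== SOURCE B (Python) =====
-- from typing import List, Optional, Tuple
--
-- def _get_codon(seq: List[str], start: int, is_first: bool = False) -> Tuple[List[str], int]:
--     # Purely functional: the frameshift nucleotides are exactly the first
--     # (3 - len(kept)) non-gap characters of seq[start+3:], so compute them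
--     # directly instead of repeated rescans with in-place blanking.
--     # (Unlike A, B does not mutate seq; return values are identical.)
--     codon = seq[start:start + 3]
--     gaps = codon.count('-')
--     if gaps == 3 or (is_first and gaps) or 'N' in codon:
--         return codon, None
--     kept = [n for n in codon if n != '-']
--     extra = [c for c in seq[start + 3:] if c != '-'][:3 - len(kept)]
--     return kept + extra, 3 - len(kept)
-- ===== Notes on version B (the rewrite author's own statement) =====
-- stated objective: simpler
-- what changed: A drives a while-loop of repeated full rescans (_find_next_nucl) with in-place blanking of seq; B computes the result functionally in one expression: the frameshift nucleotides are exactly the first 3-len(kept) non-gap characters of seq[start+3:], taken by filter+slice, with the three guard clauses folded into one condition over the gap count; B does not mutate seq (return values are identical).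
-- outside the precondition, e.g. on _get_codon(['C', 'N'], -3, True): A returns ([], 3), B returns (['C', 'N'], 3)
import Mathlib
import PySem

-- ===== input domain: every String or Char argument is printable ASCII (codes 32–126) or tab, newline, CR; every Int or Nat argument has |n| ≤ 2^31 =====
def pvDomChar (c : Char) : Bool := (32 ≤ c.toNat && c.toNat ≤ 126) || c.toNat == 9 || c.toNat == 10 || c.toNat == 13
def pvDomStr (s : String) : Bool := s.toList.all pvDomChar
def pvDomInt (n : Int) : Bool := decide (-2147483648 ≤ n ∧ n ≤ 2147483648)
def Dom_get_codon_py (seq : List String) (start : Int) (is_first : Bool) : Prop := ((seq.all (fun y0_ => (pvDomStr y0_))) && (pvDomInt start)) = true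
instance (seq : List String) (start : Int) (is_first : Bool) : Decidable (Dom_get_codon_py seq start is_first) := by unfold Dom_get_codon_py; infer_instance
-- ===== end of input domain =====

-- B replaces A's rescanning-and-blanking while-loop by one functional filter+take over seq[start+3:]
-- (simpler); A mutates seq in place in Python, B does not: the theorems are about the return value only.


-- ===== PORT A =====
-- _find_next_nucl: first index i in range(start+3, len(seq)) with seq[i] != '-'
def find_next_nucl (seq : List String) (start : Int) : Option Int :=
  (PySem.List.pyRange (start + 3) (seq.length : Int) 1).find?
    (fun i => !(PySem.List.pyGetD seq i "-" == "-"))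

-- the `while len(codon) < 3` loop; each non-break iteration appends one nucleotide, so fuel 3 suffices
def get_codon_loop : Nat → List String → List String → Int → List String
  | 0, codon, _, _ => codon
  | fuel+1, codon, seq, start =>
    if codon.length < 3 then
      match find_next_nucl seq start with
      | none => codon
      | some i =>
        if i = 0 then codon   -- Python's `if not next_nucl: break` (the index 0 is falsy too)
        else get_codon_loop fuel (codon ++ [PySem.List.pyGetD seq i "-"]) (PySem.List.pySetD seq i "-") start
    else codon

def get_codon_py (seq : List String) (start : Int) (is_first : Bool) : List String × Option Int :=
  let codon := PySem.List.slice seq (some start) (some (start + 3))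
  if codon == ["-", "-", "-"] then (codon, none)
  else if is_first && codon.contains "-" then (codon, none)
  else if codon.contains "N" then (codon, none)
  else
    let codon2 := codon.filter (fun n => !(n == "-"))
    let fs : Int := 3 - (codon2.length : Int)
    (get_codon_loop 3 codon2 seq start, some fs)

-- ===== PORT B =====
def get_codon_py_alt (seq : List String) (start : Int) (is_first : Bool) : List String × Option Int :=
  let codon := PySem.List.slice seq (some start) (some (start + 3))
  let gaps := PySem.List.count codon "-"
  if gaps == 3 || (is_first && gaps != 0) || codon.contains "N" then (codon, none)
  else
    let kept := codon.filter (fun n => !(n == "-"))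
    let extra := ((PySem.List.slice seq (some (start + 3)) none).filter (fun c => !(c == "-"))).take (3 - kept.length)
    (kept ++ extra, some (3 - (kept.length : Int)))

-- ===== PRECONDITION & SPEC =====
-- Pre_ restricts to the function's natural domain: codon start positions are non-negative. For negative
-- start A's value is an artefact of Python's negative-index wraparound combined with A's `if not next_nucl`
-- treating the found index 0 as falsy (and A can even raise IndexError when start+3 < -len(seq)).
def Pre_get_codon_py (seq : List String) (start : Int) (is_first : Bool) : Prop := 0 ≤ start
instance (seq : List String) (start : Int) (is_first : Bool) : Decidable (Pre_get_codon_py seq start is_first) := by unfold Pre_get_codon_py; infer_instance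

def pvWitness_get_codon_py : List String × Int × Bool := (["A", "-", "G", "C", "T"], 0, false)

def Spec_get_codon_py (seq : List String) (start : Int) (is_first : Bool) (out : List String × Option Int) : Prop := out = get_codon_py_alt seq start is_first
instance (seq : List String) (start : Int) (is_first : Bool) (out : List String × Option Int) : Decidable (Spec_get_codon_py seq start is_first out) := by unfold Spec_get_codon_py; infer_instance

-- ===== CLAIM =====
def Claim_equal_get_codon_py : Prop := ∀ (seq : List String) (start : Int) (is_first : Bool), Dom_get_codon_py seq start is_first → Pre_get_codon_py seq start is_first → Spec_get_codon_py seq start is_first (get_codon_py seq start is_first)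

-- ===== LEMMAS AND PROOFS =====

-- Structure of one rescan of A: either the whole tail seq[a:] is gaps, or the first found index i
-- carries the head of the filtered tail, and blanking i turns that filtered tail into its own tail.
lemma find_struct : ∀ (n : Nat) (seq : List String) (a : Int), 0 ≤ a → seq.length - a.toNat = n →
    ((PySem.List.pyRange a (seq.length : Int) 1).find? (fun i => !(PySem.List.pyGetD seq i "-" == "-")) = none
       ∧ (seq.drop a.toNat).filter (fun s => !(s == "-")) = [])
    ∨ (∃ i, (PySem.List.pyRange a (seq.length : Int) 1).find? (fun i => !(PySem.List.pyGetD seq i "-" == "-")) = some i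
       ∧ a ≤ i ∧ i < (seq.length : Int)
       ∧ (seq.drop a.toNat).filter (fun s => !(s == "-"))
           = PySem.List.pyGetD seq i "-" :: ((seq.set i.toNat "-").drop a.toNat).filter (fun s => !(s == "-"))) := by
  intro n
  induction n with
  | zero =>
    intro seq a ha hm
    left
    refine ⟨?_, ?_⟩
    · rw [PySem.List.pyRange_one_eq_nil (by omega)]; rfl
    · rw [List.drop_eq_nil_of_le (by omega)]; rfl
  | succ m ih =>
    intro seq a ha hm
    by_cases hlt : a < (seq.length : Int)
    · have haN : a.toNat < seq.length := by omega
      rw [PySem.List.pyRange_one_cons hlt, List.find?_cons]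
      have hget : PySem.List.pyGetD seq a "-" = seq[a.toNat] :=
        PySem.List.pyGetD_eq_getElem seq "-" ha (by omega)
      rw [List.drop_eq_getElem_cons haN]
      by_cases hh : seq[a.toNat] = "-"
      · -- gap at a: the predicate is false and the head is filtered out on both sides
        have hpred : (!(PySem.List.pyGetD seq a "-" == "-")) = false := by simp [hget, hh]
        rw [hpred]
        have ih' := ih seq (a + 1) (by omega) (by omega)
        have ha1 : (a + 1).toNat = a.toNat + 1 := by omega
        rw [ha1] at ih'
        rcases ih' with ⟨hn, hf⟩ | ⟨i, hfind, hai, hilt, hfilt⟩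
        · left
          exact ⟨hn, by simp [hh, hf]⟩
        · right
          refine ⟨i, hfind, by omega, hilt, ?_⟩
          have hia : i.toNat ≠ a.toNat := by omega
          have haN' : a.toNat < (seq.set i.toNat "-").length := by simpa using haN
          have hsetget : (seq.set i.toNat "-")[a.toNat]'haN' = seq[a.toNat] := by
            rw [List.getElem_set]; simp [hia]
          have htail : List.filter (fun s => !(s == "-")) (List.drop a.toNat (seq.set i.toNat "-"))
              = List.filter (fun s => !(s == "-")) (List.drop (a.toNat + 1) (seq.set i.toNat "-")) := by
            rw [List.drop_eq_getElem_cons haN', List.filter_cons]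
            simp [hsetget, hh]
          rw [List.filter_cons, if_neg (by simp [hh]), hfilt, htail]
      · -- nucleotide at a: the rescan finds exactly a; blanking a removes the head of the filtered tail
        right
        have hptrue : (!(seq[a.toNat] == "-")) = true := by simp [hh]
        refine ⟨a, ?_, le_refl a, hlt, ?_⟩
        · simp [hget, hptrue]
        · have haN' : a.toNat < (seq.set a.toNat "-").length := by simpa using haN
          have hsetself : (seq.set a.toNat "-")[a.toNat]'haN' = "-" := by
            rw [List.getElem_set]; simp
          rw [hget, List.filter_cons, if_pos hptrue]
          congr 1
          rw [List.drop_eq_getElem_cons haN', List.filter_cons]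
          rw [List.drop_set_of_lt (by omega)]
          simp [hsetself]
    · left
      refine ⟨?_, ?_⟩
      · rw [PySem.List.pyRange_one_eq_nil (by omega)]; rfl
      · rw [List.drop_eq_nil_of_le (by omega)]; rfl

-- A's loop appends exactly the first (3 - |codon|) non-gap characters of seq[start+3:]
lemma loop_eq_filter_take : ∀ (fuel : Nat) (codon seq : List String) (start : Int), 0 ≤ start →
    codon.length ≤ 3 → 3 - codon.length ≤ fuel →
    get_codon_loop fuel codon seq start
      = codon ++ ((seq.drop (start + 3).toNat).filter (fun s => !(s == "-"))).take (3 - codon.length) := by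
  intro fuel
  induction fuel with
  | zero =>
    intro codon seq start hs hle hf
    have h3 : codon.length = 3 := by omega
    simp [get_codon_loop, h3]
  | succ f ih =>
    intro codon seq start hs hle hf
    by_cases h3 : codon.length < 3
    · rcases find_struct (seq.length - (start+3).toNat) seq (start+3) (by omega) rfl with
        ⟨hn, hfilt⟩ | ⟨i, hfind, hai, hilt, hfilt⟩
      · simp [get_codon_loop, h3, find_next_nucl, hn, hfilt]
      · have hi0 : ¬ (i = 0) := by omega
        have hset : PySem.List.pySetD seq i "-" = seq.set i.toNat "-" :=
          PySem.List.pySetD_of_nonneg seq "-" (by omega)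
        have ihc := ih (codon ++ [PySem.List.pyGetD seq i "-"]) (seq.set i.toNat "-") start hs
          (by simp; omega) (by simp; omega)
        simp only [get_codon_loop, if_pos h3]
        show (match find_next_nucl seq start with
              | none => codon
              | some i => if i = 0 then codon
                  else get_codon_loop f (codon ++ [PySem.List.pyGetD seq i "-"]) (PySem.List.pySetD seq i "-") start)
            = _
        rw [show find_next_nucl seq start = some i from hfind]
        simp only [hi0, if_false]
        rw [hset, ihc, hfilt]
        have hlc : 3 - codon.length = (3 - (codon.length + 1)) + 1 := by omega
        rw [hlc, List.take_succ_cons]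
        simp
    · have h33 : 3 - codon.length = 0 := by omega
      simp [get_codon_loop, h3, h33]

-- the two ports agree for every non-negative start
lemma get_codon_eq (seq : List String) (start : Int) (is_first : Bool) (hs : 0 ≤ start) :
    get_codon_py seq start is_first = get_codon_py_alt seq start is_first := by
  unfold get_codon_py get_codon_py_alt
  simp only []
  set c := PySem.List.slice seq (some start) (some (start + 3)) with hc
  have hclen : c.length ≤ 3 := by
    rw [hc, PySem.List.slice_toNat seq hs (by omega)]
    have h33 : (start + 3).toNat - start.toNat = 3 := by omega
    rw [h33]
    exact List.length_take_le _ _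
  -- B's single guard condition is the disjunction of A's three guards
  have hguard : (PySem.List.count c "-" == 3 || (is_first && PySem.List.count c "-" != 0) || c.contains "N")
      = ((c == ["-", "-", "-"]) || (is_first && c.contains "-") || c.contains "N") := by
    rw [PySem.List.count_eq]
    congr 1
    congr 1
    · -- a slice of length ≤ 3 with three '-' IS ['-','-','-']
      by_cases he : c = ["-", "-", "-"]
      · rw [he]; rfl
      · have hne3 : List.count "-" c ≠ 3 := by
          intro h3
          have hlc : List.count "-" c ≤ c.length := List.count_le_length
          have hlen3 : c.length = 3 := by omega
          have hall : ∀ b ∈ c, "-" = b := List.count_eq_length.mp (by omega)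
          apply he
          have hrep : c = List.replicate c.length "-" :=
            List.eq_replicate_of_mem (fun b hb => (hall b hb).symm)
          rw [hrep, hlen3]; rfl
        simp [hne3, he]
    · -- nonzero gap count IS membership of '-'
      by_cases hm : "-" ∈ c
      · have hp : List.count "-" c ≠ 0 := by
          have := List.count_pos_iff.mpr hm; omega
        simp [hp, hm]
      · have hz : List.count "-" c = 0 := by simp [List.count_eq_zero, hm]
        simp [hz, hm]
  by_cases h1 : (c == ["-", "-", "-"]) = true
  · rw [if_pos h1, if_pos (by rw [hguard, h1]; simp)]
  · by_cases h2 : (is_first && c.contains "-") = true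
    · rw [if_neg h1, if_pos h2, if_pos (by rw [hguard, h2]; simp)]
    · by_cases h3 : (c.contains "N") = true
      · rw [if_neg h1, if_neg h2, if_pos h3, if_pos (by rw [hguard, h3]; simp)]
      · rw [if_neg h1, if_neg h2, if_neg h3, if_neg (by rw [hguard]; revert h1 h2 h3; cases hx : (c == ["-", "-", "-"]) <;> cases hy : (is_first && c.contains "-") <;> cases hz : (c.contains "N") <;> simp)]
        have hkept : (c.filter (fun n => !(n == "-"))).length ≤ 3 :=
          le_trans (List.length_filter_le _ _) hclen
        rw [PySem.List.slice_from seq (show (0:Int) ≤ start + 3 by omega)]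
        rw [loop_eq_filter_take 3 (c.filter (fun n => !(n == "-"))) seq start hs hkept (by omega)]

-- ===== VERDICT =====
theorem get_codon_py_spec : Claim_equal_get_codon_py := by
  intro seq start is_first _ hpre
  exact get_codon_eq seq start is_first hpre
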